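-- pv_equiv track=rewrite | github.com/Juliane2210/LearningPython | PythonSchool/d4_8297746/d4_8297746/d4q4_8297746.py | create_clean_sorted_nodupicates_list
-- ===== SOURCE A (Python) =====
-- def clean_word(word):
--     '''(str)->str
--     Retourne une nouvelle chaine de caracteres a partir de la chaine word,
--     en minuscule, sans les caracteres specieux et sans les chiffres
--
--     La chaine retournee ne doit pas contenir:
--     ! . ? : , ' " - _ \ ( ) [ ] { } % 0 1 2 3 4 5 6 7 8 9 \t \n
--
--     >>> clean_word("co-operation.")
--     'cooperation'
--     >>> clean_word("1982")
--     ''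
--     >>> clean_word("born_y1982_m08\n")
--     'bornym'
--     >>> clean_word("SEO : 5 outils gratuits pour trouver des mots-cles pertinents")
--     'seo   outils gratuits pour trouver des motscles pertinents'
--     '''
--
--     # VOTRE CODE ICI
--     specialCharTuple = ("!", ".", "?", ":", ",", "'", "\"", "-", "_", "\\",
--                         "(", ")", "[",  "]", "#", "{", "}", "%", "\t", "\n", "0", "1", "2", "3", "4", "5", "6", "7", "8", "9")
--
--     cleanWord = ""
--     for char in word:
--         if not(char in specialCharTuple):
--             cleanWord += char
--
--     cleanWord = cleanWord.lower()
--
--     return cleanWord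
--
-- def test_letters(w1, w2):
--     '''(str,str, list of str)->bool
--     La fonction retourne True si les mots w1 et w2 ont exactement les memes
--     lettres, et False sinon
--
--     >>> test_letters("mais", "amis")
--     True
--     >>> test_letters("lapin", "pinla")
--     True
--     >>> test_letters("lapin", "alpin")
--     True
--     >>> test_letters("alin", "alpin")
--     False
--     '''
--
--     # VOTRE CODE ICI
--     sortedW1 = sorted(w1)
--     sortedW2 = sorted(w2)
--
--     return sortedW1 == sortedW2
--
-- def create_clean_sorted_nodupicates_list(s):
--     '''(str)->list of str
--     Pour la chaine s qui represente le texte, la fonction retourne une liste avec ces exigences: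
--     - les mot ne contient pas des caracteres specieux our des chiffres)
--     - il n'y a pas de mots qui se repetent dans la liste
--     - la liste est triee en ordre alphabetique (vous pouvez utilser s.sort() ou sorted())
--
--     La fonction doit applelez la fonction test_letters.
--
--     Vous pouvez utiliser s.split() pour obtenir une liste coupee par des espaces.
--
--     >>> create_clean_sorted_nodupicates_list("Consultez notre site de web pour tout savoir de l'actualite internationale, nationale et regionale.")
--     ['consultez', 'de', 'et', 'internationale', 'lactualite', 'nationale',
--         'notre', 'pour', 'regionale', 'savoir', 'site', 'tout', 'web']
--
--     '''
--
--     # VOTRE CODE ICI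
--
--     cleanWordList = []
--     listOfWords = s.split(" ")
--
--     for word in listOfWords:
--         cleanWordList.append(clean_word(word))
--
--     nonDuplicateCleanList = []
--     for index in range(0, len(cleanWordList)):
--         firstWord = cleanWordList[index]
--         foundDuplicate = False
--         for index2 in range(index+1, len(cleanWordList)):
--             secondWord = cleanWordList[index2]
--             if(test_letters(firstWord, secondWord)):
--                 # a dupe is found, don't add the first word.
--                 foundDuplicate = True
--                 break
--         if (not(foundDuplicate)):
--             nonDuplicateCleanList.append(firstWord)
--
--     nonDuplicateCleanSortedList = sorted(nonDuplicateCleanList)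
--     return nonDuplicateCleanSortedList
-- ===== SOURCE B (Python) =====
-- def create_clean_sorted_nodupicates_list(s):
--     special = set("!.?:,'\"-_\\()[]#{}%\t\n0123456789")
--     last_by_sig = {}
--     for word in s.split(" "):
--         cleaned = "".join(c for c in word if c not in special).lower()
--         last_by_sig["".join(sorted(cleaned))] = cleaned
--     return sorted(last_by_sig.values())
-- ===== Notes on version B (the rewrite author's own statement) =====
-- stated objective: faster
-- what changed: Replaces the quadratic look-ahead scan for later anagrams with a single pass over the words keyed in a dict by the sorted-letters signature (each insert overwrites, so the last word of each anagram class survives), then sorts the dict's values.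
import Mathlib
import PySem

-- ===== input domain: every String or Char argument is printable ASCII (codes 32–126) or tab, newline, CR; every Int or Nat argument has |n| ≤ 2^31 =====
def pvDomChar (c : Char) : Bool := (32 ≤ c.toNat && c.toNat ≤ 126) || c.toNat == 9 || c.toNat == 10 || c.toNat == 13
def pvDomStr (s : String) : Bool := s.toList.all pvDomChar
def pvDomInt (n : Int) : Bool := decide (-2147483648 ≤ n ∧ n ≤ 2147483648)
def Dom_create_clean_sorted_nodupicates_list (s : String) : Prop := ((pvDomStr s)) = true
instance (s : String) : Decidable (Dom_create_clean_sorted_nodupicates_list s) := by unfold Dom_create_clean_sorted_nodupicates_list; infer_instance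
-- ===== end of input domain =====

-- B replaces A's quadratic look-ahead scan for later anagrams by a single dict pass keyed
-- by the sorted-letters signature (last word of each anagram class survives), then sorts.

-- ===== PORT A =====
def pvSpecialChars : List Char :=
  ['!', '.', '?', ':', ',', '\'', '"', '-', '_', '\\',
   '(', ')', '[', ']', '#', '{', '}', '%', '\t', '\n',
   '0', '1', '2', '3', '4', '5', '6', '7', '8', '9']

def clean_word (word : String) : String :=
  let cleanWord := word.toList.foldl
    (fun acc c => if pvSpecialChars.contains c then acc else acc ++ [c]) []
  PySem.Str.lower (String.ofList cleanWord)

def test_letters (w1 w2 : String) : Bool :=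
  PySem.List.sorted w1.toList (fun x => x) false == PySem.List.sorted w2.toList (fun x => x) false

-- the nested index loop of A: for each word, drop it iff some LATER word has the same letters
def pvDedupLoop : List String → List String → List String
  | acc, [] => acc
  | acc, w :: rest =>
      pvDedupLoop (if rest.any (fun w2 => test_letters w w2) then acc else acc ++ [w]) rest

def create_clean_sorted_nodupicates_list (s : String) : List String :=
  let listOfWords := (PySem.Str.split? s " ").getD []
  let cleanWordList := listOfWords.map clean_word
  let nonDuplicateCleanList := pvDedupLoop [] cleanWordList
  PySem.List.sorted nonDuplicateCleanList (fun x => x) false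

-- ===== PORT B =====
def pvSpecialSet : PySem.Set Char := PySem.Set.ofList "!.?:,'\"-_\\()[]#{}%\t\n0123456789".toList

def pvCleanB (word : String) : String :=
  PySem.Str.lower (String.ofList (word.toList.filter (fun c => !(PySem.Set.contains pvSpecialSet c))))

def pvSigOf (w : String) : String :=
  String.ofList (PySem.List.sorted w.toList (fun x => x) false)

def create_clean_sorted_nodupicates_list_alt (s : String) : List String :=
  let lastBySig := ((PySem.Str.split? s " ").getD []).foldl
      (fun d word => d.insert (pvSigOf (pvCleanB word)) (pvCleanB word))
      (PySem.Dict.empty : PySem.Dict String String)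
  PySem.List.sorted lastBySig.values (fun x => x) false

-- ===== PRECONDITION & SPEC =====
def Spec_create_clean_sorted_nodupicates_list (s : String) (out : List String) : Prop := out = create_clean_sorted_nodupicates_list_alt s
instance (s : String) (out : List String) : Decidable (Spec_create_clean_sorted_nodupicates_list s out) := by unfold Spec_create_clean_sorted_nodupicates_list; infer_instance

-- ===== CLAIM (what is proved, stated in full; the proofs are below) =====
def Claim_equal_create_clean_sorted_nodupicates_list : Prop := ∀ (s : String), Dom_create_clean_sorted_nodupicates_list s → Spec_create_clean_sorted_nodupicates_list s (create_clean_sorted_nodupicates_list s)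

-- ===== LEMMAS AND PROOFS =====

-- the sorted-letters signature, as a list of chars
def pvSigL (w : String) : List Char := PySem.List.sorted w.toList (fun x => x) false

-- structural form of A's dedup loop (no accumulator)
def pvSurv : List String → List String
  | [] => []
  | w :: rest => (if rest.any (fun w2 => test_letters w w2) then [] else [w]) ++ pvSurv rest

-- x is the last representative of its anagram class in ws
abbrev pvLastRep (ws : List String) (x : String) : Prop :=
  ∃ l1 l2, ws = l1 ++ x :: l2 ∧ ∀ y ∈ l2, pvSigL y ≠ pvSigL x

-- the last element of ws with signature k
def pvLastWith (k : String) (ws : List String) : Option String :=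
  ws.foldl (fun acc w => if pvSigOf w = k then some w else acc) none

theorem pvCleanEq (w : String) : clean_word w = pvCleanB w := by
  have hset : (pvSpecialSet : List Char) = pvSpecialChars := by decide
  have hfun : (fun (acc : List Char) c => if pvSpecialChars.contains c = true then acc else acc ++ [c])
      = fun acc c => if (!pvSpecialChars.contains c) = true then acc ++ [c] else acc := by
    funext acc c
    cases h : pvSpecialChars.contains c <;> simp

  simp only [clean_word, pvCleanB, hfun, PySem.List.foldl_append_if_eq_filter, hset,
    List.nil_append, PySem.Set.contains_eq_listContains]

theorem pvTestIff (w1 w2 : String) : test_letters w1 w2 = true ↔ pvSigL w1 = pvSigL w2 := by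
  unfold test_letters pvSigL
  simp

theorem pvSigOfEq (w1 w2 : String) : pvSigOf w1 = pvSigOf w2 ↔ pvSigL w1 = pvSigL w2 := by
  unfold pvSigOf pvSigL
  constructor
  · intro h; have := congrArg String.toList h; simpa using this
  · intro h; rw [h]

theorem pvDedupLoop_eq (ws : List String) : ∀ acc, pvDedupLoop acc ws = acc ++ pvSurv ws := by
  induction ws with
  | nil => intro acc; simp [pvDedupLoop, pvSurv]
  | cons w rest ih =>
      intro acc
      simp only [pvDedupLoop, pvSurv, ih]
      split_ifs with h <;> simp

theorem pvMemSurv (ws : List String) (x : String) : x ∈ pvSurv ws ↔ pvLastRep ws x := by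
  induction ws with
  | nil => simp [pvSurv]
  | cons w rest ih =>
      simp only [pvSurv, List.mem_append]
      constructor
      · rintro (hx | hrest)
        · by_cases h : (rest.any fun w2 => test_letters w w2) = true
          · simp [h] at hx
          · simp [h] at hx
            subst hx
            exact ⟨[], rest, rfl, fun y hy hsig =>
              h (List.any_eq_true.2 ⟨y, hy, (pvTestIff x y).2 hsig.symm⟩)⟩
        · obtain ⟨l1, l2, hdec, hl2⟩ := ih.1 hrest
          exact ⟨w :: l1, l2, by rw [hdec, List.cons_append], hl2⟩
      · rintro ⟨l1, l2, hdec, hl2⟩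
        cases l1 with
        | nil =>
            simp only [List.nil_append] at hdec
            injection hdec with h1 h2
            subst h1; subst h2
            left
            have h : (rest.any fun w2 => test_letters w w2) = false := by
              simp only [List.any_eq_false]
              intro y hy hty
              exact hl2 y hy ((pvTestIff w y).1 hty).symm
            simp [h]
        | cons a l1' =>
            simp only [List.cons_append] at hdec
            injection hdec with h1 h2
            subst h1
            exact Or.inr (ih.2 ⟨l1', l2, h2, hl2⟩)

theorem pvSurvNodup (ws : List String) : (pvSurv ws).Nodup := by
  induction ws with
  | nil => simp [pvSurv]
  | cons w rest ih =>
      simp only [pvSurv]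
      split_ifs with h
      · simpa using ih
      · simp only [List.singleton_append, List.nodup_cons]
        refine ⟨?_, ih⟩
        intro hmem
        obtain ⟨l1, l2, hdec, _⟩ := (pvMemSurv rest w).1 hmem
        apply h
        refine List.any_eq_true.2 ⟨w, ?_, (pvTestIff w w).2 rfl⟩
        rw [hdec]; simp

theorem pvLastWith_snoc (k : String) (ws : List String) (w : String) :
    pvLastWith k (ws ++ [w]) = if pvSigOf w = k then some w else pvLastWith k ws := by
  unfold pvLastWith
  rw [List.foldl_append]
  simp only [List.foldl_cons, List.foldl_nil]

theorem pvLastRep_snoc (ws : List String) (w x : String) :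
    pvLastRep (ws ++ [w]) x ↔ x = w ∨ (pvLastRep ws x ∧ pvSigL w ≠ pvSigL x) := by
  constructor
  · rintro ⟨l1, l2, hdec, hl2⟩
    rcases List.eq_nil_or_concat l2 with rfl | ⟨l2', b, rfl⟩
    · have h := List.append_inj' hdec (by simp)
      have hw : w = x := by simpa using h.2
      exact Or.inl hw.symm
    · have hdec' : ws ++ [w] = (l1 ++ x :: l2') ++ [b] := by
        rw [hdec]; simp
      have h := List.append_inj' hdec' (by simp)
      have hb : w = b := by simpa using h.2
      refine Or.inr ⟨⟨l1, l2', h.1, fun y hy => hl2 y (by simp [hy])⟩, ?_⟩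
      have := hl2 b (by simp)
      rw [hb]; exact this
  · rintro (rfl | ⟨⟨l1, l2, hdec, hl2⟩, hne⟩)
    · exact ⟨ws, [], by simp, by simp⟩
    · refine ⟨l1, l2 ++ [w], by simp [hdec], ?_⟩
      intro y hy
      rcases List.mem_append.1 hy with h | h
      · exact hl2 y h
      · have : y = w := by simpa using h
        subst this; exact hne

theorem pvLastWith_iff (ws : List String) (k x : String) :
    pvLastWith k ws = some x ↔ k = pvSigOf x ∧ pvLastRep ws x := by
  induction ws using List.reverseRecOn with
  | nil =>
      constructor
      · intro h; simp [pvLastWith] at h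
      · rintro ⟨_, l1, l2, hdec, _⟩; simp at hdec
  | append_singleton ws w ih =>
      rw [pvLastWith_snoc, pvLastRep_snoc]
      split_ifs with h
      · constructor
        · intro hx
          have hx' : w = x := by simpa using hx
          subst hx'
          exact ⟨h.symm, Or.inl rfl⟩
        · rintro ⟨hk, (rfl | ⟨_, hne⟩)⟩
          · rfl
          · exact absurd ((pvSigOfEq w x).1 (by rw [h, hk])) hne
      · rw [ih]
        constructor
        · rintro ⟨hk, hrep⟩
          refine ⟨hk, Or.inr ⟨hrep, fun hs => h (by rw [(pvSigOfEq w x).2 hs, hk])⟩⟩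
        · rintro ⟨hk, (rfl | ⟨hrep, _⟩)⟩
          · exact absurd hk.symm h
          · exact ⟨hk, hrep⟩

-- the dict fold of port B, over the cleaned words
def pvIns (d : PySem.Dict String String) (w : String) : PySem.Dict String String :=
  d.insert (pvSigOf w) w

theorem pvGetFold (ws : List String) : ∀ (d : PySem.Dict String String) (k : String),
    (ws.foldl pvIns d).get? k =
      match pvLastWith k ws with
      | some v => some v
      | none => d.get? k := by
  induction ws using List.reverseRecOn with
  | nil => intro d k; simp [pvLastWith]
  | append_singleton ws w ih =>
      intro d k
      rw [List.foldl_append, pvLastWith_snoc]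
      simp only [List.foldl_cons, List.foldl_nil, pvIns]
      rw [PySem.Dict.get?_insert]
      by_cases h : pvSigOf w = k
      · subst h; simp
      · rw [if_neg (fun hk => h hk.symm), if_neg h, ih]

theorem pvKeysNodupFold (ws : List String) :
    (ws.foldl pvIns (PySem.Dict.empty : PySem.Dict String String)).keys.Nodup := by
  have := PySem.Dict.nodup_keys_foldl_insert_key ws pvSigOf (fun _ w => w)
      (PySem.Dict.empty : PySem.Dict String String) (PySem.Dict.nodup_keys_empty)
  simpa [pvIns] using this

theorem pvGetFoldEmpty (ws : List String) (k v : String)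
    (h : (ws.foldl pvIns (PySem.Dict.empty : PySem.Dict String String)).get? k = some v) :
    pvLastWith k ws = some v := by
  rw [pvGetFold] at h
  cases hlw : pvLastWith k ws with
  | none => rw [hlw] at h; simp [PySem.Dict.get?_empty] at h
  | some u => rw [hlw] at h; simpa using h

theorem pvMemValuesFold (ws : List String) (x : String) :
    x ∈ (ws.foldl pvIns (PySem.Dict.empty : PySem.Dict String String)).values ↔ pvLastRep ws x := by
  constructor
  · intro hx
    simp only [PySem.Dict.values] at hx
    obtain ⟨⟨k, v⟩, hmem, hv⟩ := List.mem_map.1 hx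
    have hv' : v = x := hv
    have hget := PySem.Dict.get?_of_mem_items _ hmem (pvKeysNodupFold ws)
    have hrep := ((pvLastWith_iff ws k v).1 (pvGetFoldEmpty ws k v hget)).2
    rwa [hv'] at hrep
  · intro hrep
    have hlw := (pvLastWith_iff ws (pvSigOf x) x).2 ⟨rfl, hrep⟩
    have hget : (ws.foldl pvIns (PySem.Dict.empty : PySem.Dict String String)).get? (pvSigOf x)
        = some x := by
      rw [pvGetFold, hlw]
    have hitems := PySem.Dict.mem_items_of_get?_eq_some _ hget
    simp only [PySem.Dict.values]
    exact List.mem_map.2 ⟨(pvSigOf x, x), hitems, rfl⟩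

theorem pvValuesNodupFold (ws : List String) :
    (ws.foldl pvIns (PySem.Dict.empty : PySem.Dict String String)).values.Nodup := by
  have hnd := pvKeysNodupFold ws
  rw [PySem.Dict.values_eq_map_keys _ hnd ""]
  refine hnd.map_on ?_
  intro k1 h1 k2 h2 heq
  have hk : ∀ k, k ∈ (ws.foldl pvIns (PySem.Dict.empty : PySem.Dict String String)).keys →
      k = pvSigOf ((ws.foldl pvIns (PySem.Dict.empty : PySem.Dict String String)).getD k "") := by
    intro k hkm
    cases hget : (ws.foldl pvIns (PySem.Dict.empty : PySem.Dict String String)).get? k with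
    | none => exact absurd hkm ((PySem.Dict.get?_eq_none_iff_not_mem_keys _ _).1 hget)
    | some v =>
        rw [PySem.Dict.getD_eq_get?_getD, hget, Option.getD_some]
        exact ((pvLastWith_iff ws k v).1 (pvGetFoldEmpty ws k v hget)).1
  rw [hk k1 h1, hk k2 h2, heq]

theorem pvPerm (ws : List String) :
    (pvSurv ws).Perm (ws.foldl pvIns (PySem.Dict.empty : PySem.Dict String String)).values := by
  refine (List.perm_ext_iff_of_nodup (pvSurvNodup ws) (pvValuesNodupFold ws)).2 ?_
  intro x
  rw [pvMemSurv, pvMemValuesFold]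

-- ===== VERDICT (by name: the statement is the Claim_ definition above) =====
theorem create_clean_sorted_nodupicates_list_spec : Claim_equal_create_clean_sorted_nodupicates_list := by
  intro s _
  show create_clean_sorted_nodupicates_list s = create_clean_sorted_nodupicates_list_alt s
  simp only [create_clean_sorted_nodupicates_list, create_clean_sorted_nodupicates_list_alt]
  have hmap : ((PySem.Str.split? s " ").getD []).foldl
      (fun d word => d.insert (pvSigOf (pvCleanB word)) (pvCleanB word))
      (PySem.Dict.empty : PySem.Dict String String)
      = (((PySem.Str.split? s " ").getD []).map pvCleanB).foldl pvIns PySem.Dict.empty := by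
    rw [List.foldl_map]; rfl
  have hclean : ((PySem.Str.split? s " ").getD []).map clean_word
      = ((PySem.Str.split? s " ").getD []).map pvCleanB :=
    List.map_congr_left (fun w _ => pvCleanEq w)
  rw [hclean, pvDedupLoop_eq, hmap, List.nil_append]
  exact (PySem.List.sorted_id_eq_sorted_id_iff_perm _ _).2
    (pvPerm (((PySem.Str.split? s " ").getD []).map pvCleanB))
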